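-- pv_equiv track=rewrite | github.com/python-arch/SFTA-SegDino | adapters.py | _match_lora_placement
-- ===== SOURCE A (Python) =====
-- from typing import Dict, Iterable, List, Optional, Sequence, Tuple
--
-- def _match_lora_placement(name: str, child_name: str, placement_tokens: Sequence[str]) -> bool:
--     """
--     Match layer names for LoRA placement sweeps.
--
--     Tokens:
--     - Q/K/V: attention query/key/value projections (and qkv fused layers)
--     - P: attention output projection (attn.proj / out_proj / to_out)
--     - F1/F2: first/second FFN linear layers (fc1/fc2)
--     """
--     fn = f"{name}.{child_name}".lower()
--     tokens = set(placement_tokens)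
--
--     # Q/K/V include fused qkv projection names.
--     if "Q" in tokens and any(h in fn for h in ("q_proj", "query", "to_q", "wq", "qkv")):
--         return True
--     if "K" in tokens and any(h in fn for h in ("k_proj", "key", "to_k", "wk", "qkv")):
--         return True
--     if "V" in tokens and any(h in fn for h in ("v_proj", "value", "to_v", "wv", "qkv")):
--         return True
--
--     # P should target attention output projection, not generic projections.
--     if "P" in tokens and ("attn" in fn or "attention" in fn):
--         if any(h in fn for h in ("out_proj", "to_out", ".proj", " proj", ".out")):
--             return True
--
--     # FFN projections.
--     if "F1" in tokens and any(h in fn for h in ("fc1", "linear1", "mlp.0", "ffn.0")):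
--         return True
--     if "F2" in tokens and any(h in fn for h in ("fc2", "linear2", "mlp.2", "ffn.2")):
--         return True
--
--     return False
-- ===== SOURCE B (Python) =====
-- # Table-driven: look the requested token up in a heuristics table and test the
-- # layer name against that entry; return whether any requested token qualifies.
-- _HEURISTICS = {
--     "Q": (False, ("q_proj", "query", "to_q", "wq", "qkv")),
--     "K": (False, ("k_proj", "key", "to_k", "wk", "qkv")),
--     "V": (False, ("v_proj", "value", "to_v", "wv", "qkv")),
--     "P": (True, ("out_proj", "to_out", ".proj", " proj", ".out")),
--     "F1": (False, ("fc1", "linear1", "mlp.0", "ffn.0")),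
--     "F2": (False, ("fc2", "linear2", "mlp.2", "ffn.2")),
-- }
--
--
-- def _match_lora_placement(name, child_name, placement_tokens):
--     fn = (name + "." + child_name).lower()
--
--     def qualifies(tok):
--         entry = _HEURISTICS.get(tok)
--         if entry is None:
--             return False
--         attn_gate, subs = entry
--         if attn_gate and not ("attn" in fn or "attention" in fn):
--             return False
--         return any(h in fn for h in subs)
--
--     return any(qualifies(t) for t in placement_tokens)
-- ===== Notes on version B (the rewrite author's own statement) =====
-- stated objective: alternative
-- what changed: B is table-driven: it iterates over the requested placement tokens, looks each one up in a heuristics table (gate flag + substring list) and tests the name against that entry, instead of A's hard-coded early-return chain over the six token kinds with the requested tokens held in a set.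
import Mathlib
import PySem

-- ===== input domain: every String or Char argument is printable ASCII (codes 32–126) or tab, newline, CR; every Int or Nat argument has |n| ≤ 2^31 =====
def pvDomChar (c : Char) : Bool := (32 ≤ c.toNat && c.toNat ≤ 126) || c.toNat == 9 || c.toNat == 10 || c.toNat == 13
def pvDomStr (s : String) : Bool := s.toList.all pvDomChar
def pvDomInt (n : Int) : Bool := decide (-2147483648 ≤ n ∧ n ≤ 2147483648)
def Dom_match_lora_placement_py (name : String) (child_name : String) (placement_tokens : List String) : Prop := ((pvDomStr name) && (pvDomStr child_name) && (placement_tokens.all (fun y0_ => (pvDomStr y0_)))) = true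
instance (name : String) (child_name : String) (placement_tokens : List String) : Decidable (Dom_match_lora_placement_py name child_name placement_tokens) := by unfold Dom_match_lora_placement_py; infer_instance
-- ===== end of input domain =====

-- B is table-driven: it iterates over the requested tokens, looks each up in a heuristics
-- table (attn-gate flag + substring list) and tests the name against that entry, instead of
-- A's hard-coded early-return chain over the six token kinds (alternative decomposition).


-- ===== PORT A =====
-- A: early-return token chain, transliterated branch for branch (the nested P-branch
-- falls through to F1/F2 when its inner test fails, rendered as the && of its two tests).
def match_lora_placement_py (name : String) (child_name : String) (placement_tokens : List String) : Bool :=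
  let fn : List Char := PySem.Chars.lower (name.toList ++ '.' :: child_name.toList)
  let tokens : PySem.Set String := PySem.Set.ofList placement_tokens
  if tokens.contains "Q" && ["q_proj".toList, "query".toList, "to_q".toList, "wq".toList, "qkv".toList].any (fun h => PySem.Chars.isIn h fn) then true
  else if tokens.contains "K" && ["k_proj".toList, "key".toList, "to_k".toList, "wk".toList, "qkv".toList].any (fun h => PySem.Chars.isIn h fn) then true
  else if tokens.contains "V" && ["v_proj".toList, "value".toList, "to_v".toList, "wv".toList, "qkv".toList].any (fun h => PySem.Chars.isIn h fn) then true
  else if (tokens.contains "P" && (PySem.Chars.isIn "attn".toList fn || PySem.Chars.isIn "attention".toList fn))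
          && ["out_proj".toList, "to_out".toList, ".proj".toList, " proj".toList, ".out".toList].any (fun h => PySem.Chars.isIn h fn) then true
  else if tokens.contains "F1" && ["fc1".toList, "linear1".toList, "mlp.0".toList, "ffn.0".toList].any (fun h => PySem.Chars.isIn h fn) then true
  else if tokens.contains "F2" && ["fc2".toList, "linear2".toList, "mlp.2".toList, "ffn.2".toList].any (fun h => PySem.Chars.isIn h fn) then true
  else false

-- ===== PORT B =====
-- B: the module-level heuristics table (token -> (attn-gate flag, substring list)).
def pvHeuristics : PySem.Dict String (Bool × List (List Char)) :=
  PySem.Dict.ofList [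
    ("Q",  (false, ["q_proj".toList, "query".toList, "to_q".toList, "wq".toList, "qkv".toList])),
    ("K",  (false, ["k_proj".toList, "key".toList, "to_k".toList, "wk".toList, "qkv".toList])),
    ("V",  (false, ["v_proj".toList, "value".toList, "to_v".toList, "wv".toList, "qkv".toList])),
    ("P",  (true,  ["out_proj".toList, "to_out".toList, ".proj".toList, " proj".toList, ".out".toList])),
    ("F1", (false, ["fc1".toList, "linear1".toList, "mlp.0".toList, "ffn.0".toList])),
    ("F2", (false, ["fc2".toList, "linear2".toList, "mlp.2".toList, "ffn.2".toList]))]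

-- B: the inner closure `qualifies(tok)` — table lookup, gate check, substring test.
def pvQualifies (fn : List Char) (tok : String) : Bool :=
  match PySem.Dict.get? pvHeuristics tok with
  | none => false
  | some (attnGate, subs) =>
    if attnGate && !(PySem.Chars.isIn "attn".toList fn || PySem.Chars.isIn "attention".toList fn) then false
    else subs.any (fun h => PySem.Chars.isIn h fn)

def match_lora_placement_py_alt (name : String) (child_name : String) (placement_tokens : List String) : Bool :=
  let fn : List Char := PySem.Chars.lower (name.toList ++ '.' :: child_name.toList)
  placement_tokens.any (pvQualifies fn)

-- ===== PRECONDITION & SPEC =====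
def Spec_match_lora_placement_py (name : String) (child_name : String) (placement_tokens : List String) (out : Bool) : Prop := out = match_lora_placement_py_alt name child_name placement_tokens
instance (name : String) (child_name : String) (placement_tokens : List String) (out : Bool) : Decidable (Spec_match_lora_placement_py name child_name placement_tokens out) := by unfold Spec_match_lora_placement_py; infer_instance

-- ===== CLAIM =====
def Claim_equal_match_lora_placement_py : Prop := ∀ (name : String) (child_name : String) (placement_tokens : List String), Dom_match_lora_placement_py name child_name placement_tokens → Spec_match_lora_placement_py name child_name placement_tokens (match_lora_placement_py name child_name placement_tokens)

-- ===== LEMMAS AND PROOFS =====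
theorem pv_contains_ofList (ts : List String) (x : String) :
    PySem.Set.contains (PySem.Set.ofList ts) x = decide (x ∈ ts) := by
  rw [Bool.eq_iff_iff]
  simp [PySem.Set.mem_ofList]

-- pvHeuristics, as a literal Dict (ofList evaluated once).
theorem pvHeuristics_mk : pvHeuristics = PySem.Dict.mk [
    ("Q",  (false, ["q_proj".toList, "query".toList, "to_q".toList, "wq".toList, "qkv".toList])),
    ("K",  (false, ["k_proj".toList, "key".toList, "to_k".toList, "wk".toList, "qkv".toList])),
    ("V",  (false, ["v_proj".toList, "value".toList, "to_v".toList, "wv".toList, "qkv".toList])),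
    ("P",  (true,  ["out_proj".toList, "to_out".toList, ".proj".toList, " proj".toList, ".out".toList])),
    ("F1", (false, ["fc1".toList, "linear1".toList, "mlp.0".toList, "ffn.0".toList])),
    ("F2", (false, ["fc2".toList, "linear2".toList, "mlp.2".toList, "ffn.2".toList]))] := by rfl

-- pvQualifies, spelled out as a disjunction over the six token kinds.
theorem pvQualifies_eq (fn : List Char) (t : String) :
    pvQualifies fn t =
      ((t == "Q") && ["q_proj".toList, "query".toList, "to_q".toList, "wq".toList, "qkv".toList].any (fun h => PySem.Chars.isIn h fn)
       || (t == "K") && ["k_proj".toList, "key".toList, "to_k".toList, "wk".toList, "qkv".toList].any (fun h => PySem.Chars.isIn h fn)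
       || (t == "V") && ["v_proj".toList, "value".toList, "to_v".toList, "wv".toList, "qkv".toList].any (fun h => PySem.Chars.isIn h fn)
       || (t == "P") && (PySem.Chars.isIn "attn".toList fn || PySem.Chars.isIn "attention".toList fn)
                     && ["out_proj".toList, "to_out".toList, ".proj".toList, " proj".toList, ".out".toList].any (fun h => PySem.Chars.isIn h fn)
       || (t == "F1") && ["fc1".toList, "linear1".toList, "mlp.0".toList, "ffn.0".toList].any (fun h => PySem.Chars.isIn h fn)
       || (t == "F2") && ["fc2".toList, "linear2".toList, "mlp.2".toList, "ffn.2".toList].any (fun h => PySem.Chars.isIn h fn)) := by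
  by_cases hq : t = "Q"
  · subst hq
    simp [pvQualifies, show PySem.Dict.get? pvHeuristics "Q" = some (false, ["q_proj".toList, "query".toList, "to_q".toList, "wq".toList, "qkv".toList]) from rfl]
  by_cases hk : t = "K"
  · subst hk
    simp [pvQualifies, show PySem.Dict.get? pvHeuristics "K" = some (false, ["k_proj".toList, "key".toList, "to_k".toList, "wk".toList, "qkv".toList]) from rfl]
  by_cases hv : t = "V"
  · subst hv
    simp [pvQualifies, show PySem.Dict.get? pvHeuristics "V" = some (false, ["v_proj".toList, "value".toList, "to_v".toList, "wv".toList, "qkv".toList]) from rfl]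
  by_cases hp : t = "P"
  · subst hp
    cases hga : PySem.Chars.isIn "attn".toList fn <;> cases hgb : PySem.Chars.isIn "attention".toList fn <;>
      simp_all [pvQualifies, show PySem.Dict.get? pvHeuristics "P" = some (true, ["out_proj".toList, "to_out".toList, ".proj".toList, " proj".toList, ".out".toList]) from rfl]
  by_cases h1 : t = "F1"
  · subst h1
    simp [pvQualifies, show PySem.Dict.get? pvHeuristics "F1" = some (false, ["fc1".toList, "linear1".toList, "mlp.0".toList, "ffn.0".toList]) from rfl]
  by_cases h2 : t = "F2"
  · subst h2
    simp [pvQualifies, show PySem.Dict.get? pvHeuristics "F2" = some (false, ["fc2".toList, "linear2".toList, "mlp.2".toList, "ffn.2".toList]) from rfl]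
  have hn : PySem.Dict.get? pvHeuristics t = none := by
    simp [pvHeuristics_mk, PySem.Dict.get?, beq_iff_eq,
      Ne.symm hq, Ne.symm hk, Ne.symm hv, Ne.symm hp, Ne.symm h1, Ne.symm h2]
  simp [pvQualifies, hn, hq, hk, hv, hp, h1, h2]

theorem pv_any_qualifies (fn : List Char) (ts : List String) :
    ts.any (pvQualifies fn) =
      (decide ("Q" ∈ ts) && ["q_proj".toList, "query".toList, "to_q".toList, "wq".toList, "qkv".toList].any (fun h => PySem.Chars.isIn h fn)
       || decide ("K" ∈ ts) && ["k_proj".toList, "key".toList, "to_k".toList, "wk".toList, "qkv".toList].any (fun h => PySem.Chars.isIn h fn)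
       || decide ("V" ∈ ts) && ["v_proj".toList, "value".toList, "to_v".toList, "wv".toList, "qkv".toList].any (fun h => PySem.Chars.isIn h fn)
       || decide ("P" ∈ ts) && (PySem.Chars.isIn "attn".toList fn || PySem.Chars.isIn "attention".toList fn)
                     && ["out_proj".toList, "to_out".toList, ".proj".toList, " proj".toList, ".out".toList].any (fun h => PySem.Chars.isIn h fn)
       || decide ("F1" ∈ ts) && ["fc1".toList, "linear1".toList, "mlp.0".toList, "ffn.0".toList].any (fun h => PySem.Chars.isIn h fn)
       || decide ("F2" ∈ ts) && ["fc2".toList, "linear2".toList, "mlp.2".toList, "ffn.2".toList].any (fun h => PySem.Chars.isIn h fn)) := by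
  rw [Bool.eq_iff_iff]
  simp only [List.any_eq_true, pvQualifies_eq, Bool.or_eq_true, Bool.and_eq_true, beq_iff_eq,
    decide_eq_true_eq]
  constructor
  · rintro ⟨t, ht, (((((⟨rfl, h⟩ | ⟨rfl, h⟩) | ⟨rfl, h⟩) | ⟨⟨rfl, hg⟩, h⟩) | ⟨rfl, h⟩) | ⟨rfl, h⟩)⟩
    · exact Or.inl (Or.inl (Or.inl (Or.inl (Or.inl ⟨ht, h⟩))))
    · exact Or.inl (Or.inl (Or.inl (Or.inl (Or.inr ⟨ht, h⟩))))
    · exact Or.inl (Or.inl (Or.inl (Or.inr ⟨ht, h⟩)))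
    · exact Or.inl (Or.inl (Or.inr ⟨⟨ht, hg⟩, h⟩))
    · exact Or.inl (Or.inr ⟨ht, h⟩)
    · exact Or.inr ⟨ht, h⟩
  · rintro ((((((⟨hm, h⟩ | ⟨hm, h⟩) | ⟨hm, h⟩) | ⟨⟨hm, hg⟩, h⟩) | ⟨hm, h⟩) | ⟨hm, h⟩))
    · exact ⟨"Q", hm, Or.inl (Or.inl (Or.inl (Or.inl (Or.inl ⟨rfl, h⟩))))⟩
    · exact ⟨"K", hm, Or.inl (Or.inl (Or.inl (Or.inl (Or.inr ⟨rfl, h⟩))))⟩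
    · exact ⟨"V", hm, Or.inl (Or.inl (Or.inl (Or.inr ⟨rfl, h⟩)))⟩
    · exact ⟨"P", hm, Or.inl (Or.inl (Or.inr ⟨⟨rfl, hg⟩, h⟩))⟩
    · exact ⟨"F1", hm, Or.inl (Or.inr ⟨rfl, h⟩)⟩
    · exact ⟨"F2", hm, Or.inr ⟨rfl, h⟩⟩

-- ===== VERDICT =====
set_option maxHeartbeats 1000000 in
theorem match_lora_placement_py_spec : Claim_equal_match_lora_placement_py := by
  intro name child_name ts _
  unfold Spec_match_lora_placement_py match_lora_placement_py match_lora_placement_py_alt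
  rw [pv_any_qualifies]
  simp only [pv_contains_ofList]
  cases hq : ["q_proj".toList, "query".toList, "to_q".toList, "wq".toList, "qkv".toList].any (fun h => PySem.Chars.isIn h (PySem.Chars.lower (name.toList ++ '.' :: child_name.toList))) <;>
  cases hk : ["k_proj".toList, "key".toList, "to_k".toList, "wk".toList, "qkv".toList].any (fun h => PySem.Chars.isIn h (PySem.Chars.lower (name.toList ++ '.' :: child_name.toList))) <;>
  cases hv : ["v_proj".toList, "value".toList, "to_v".toList, "wv".toList, "qkv".toList].any (fun h => PySem.Chars.isIn h (PySem.Chars.lower (name.toList ++ '.' :: child_name.toList))) <;>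
  cases hg : (PySem.Chars.isIn "attn".toList (PySem.Chars.lower (name.toList ++ '.' :: child_name.toList)) || PySem.Chars.isIn "attention".toList (PySem.Chars.lower (name.toList ++ '.' :: child_name.toList))) <;>
  cases hp : ["out_proj".toList, "to_out".toList, ".proj".toList, " proj".toList, ".out".toList].any (fun h => PySem.Chars.isIn h (PySem.Chars.lower (name.toList ++ '.' :: child_name.toList))) <;>
  cases h1 : ["fc1".toList, "linear1".toList, "mlp.0".toList, "ffn.0".toList].any (fun h => PySem.Chars.isIn h (PySem.Chars.lower (name.toList ++ '.' :: child_name.toList))) <;>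
  cases h2 : ["fc2".toList, "linear2".toList, "mlp.2".toList, "ffn.2".toList].any (fun h => PySem.Chars.isIn h (PySem.Chars.lower (name.toList ++ '.' :: child_name.toList))) <;>
    simp [Bool.or_assoc]
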